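-- pv_equiv track=rewrite | github.com/huguintoch/Regex-Replacer | regexReplacerCLI.py | validRegex
-- ===== SOURCE A (Python) =====
-- def validRegex(regex):
--   size = len(regex)
--   if size == 0:
--     return False
--   for i in range(size):
--     if i == 0 and (regex[i] == "*" or regex[i] == "+"):
--       return False
--     elif i < size-1:
--       if regex[i] == "*":
--         if i == size-2 and (regex[i+1] == "+" or regex[i+1] == "*"):
--           return False
--         elif regex[i+1] == "*":
--           return False
--       elif regex[i] == "+" and (regex[i+1] == "+" or regex[i+1] == "*"):
--         return False
--   return True
-- ===== SOURCE B (Python) =====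
-- def validRegex(regex):
--   return (bool(regex)
--           and regex[0] != "*" and regex[0] != "+"
--           and "**" not in regex
--           and "++" not in regex
--           and "+*" not in regex
--           and not regex.endswith("*+"))
-- ===== Notes on version B (the rewrite author's own statement) =====
-- stated objective: simpler
-- what changed: Replaced A's indexed for-loop with early returns by a single boolean expression of whole-string tests: non-empty, first char not a star or plus, no doubled-operator substring, and not ending in star-then-plus (that pair is only invalid as a suffix); the substring tests also run at C speed in CPython.
import Mathlib
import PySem

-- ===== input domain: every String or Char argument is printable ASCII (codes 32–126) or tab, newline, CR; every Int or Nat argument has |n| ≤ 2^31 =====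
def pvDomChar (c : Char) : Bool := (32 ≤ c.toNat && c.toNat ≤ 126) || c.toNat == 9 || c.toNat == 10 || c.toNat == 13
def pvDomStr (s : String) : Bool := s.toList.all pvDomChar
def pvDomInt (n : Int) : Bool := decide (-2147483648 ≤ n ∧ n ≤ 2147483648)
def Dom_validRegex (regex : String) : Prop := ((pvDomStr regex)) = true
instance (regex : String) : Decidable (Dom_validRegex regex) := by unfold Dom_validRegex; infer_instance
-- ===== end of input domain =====

-- B replaces A's indexed scan with a boolean combination of whole-string tests ('**'/'++'/'+*' substring, '*+' suffix); objective: simpler.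

-- ===== PORT A =====
-- A's for-loop over range(size) with early returns, as structural recursion on the index i
def validRegexGo (cs : List Char) (size i : Nat) : Bool :=
  if _h : i < size then
    (if i == 0 && (cs.getD i ' ' == '*' || cs.getD i ' ' == '+') then false
     else if i < size - 1 then
       (if cs.getD i ' ' == '*' then
          (if i == size - 2 && (cs.getD (i+1) ' ' == '+' || cs.getD (i+1) ' ' == '*') then false
           else if cs.getD (i+1) ' ' == '*' then false
           else validRegexGo cs size (i+1))
        else if cs.getD i ' ' == '+' && (cs.getD (i+1) ' ' == '+' || cs.getD (i+1) ' ' == '*') then false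
        else validRegexGo cs size (i+1))
     else validRegexGo cs size (i+1))
  else true
termination_by size - i

def validRegex (regex : String) : Bool :=
  let cs := regex.toList
  let size := cs.length
  if size = 0 then false
  else validRegexGo cs size 0

-- ===== PORT B =====
def validRegex_alt (regex : String) : Bool :=
  decide (regex ≠ "")
  && !(PySem.Str.pyGet? regex 0 == some '*')
  && !(PySem.Str.pyGet? regex 0 == some '+')
  && !(PySem.Str.isIn "**" regex)
  && !(PySem.Str.isIn "++" regex)
  && !(PySem.Str.isIn "+*" regex)
  && !(PySem.Str.endswith regex "*+")

-- ===== PRECONDITION & SPEC =====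
def Spec_validRegex (regex : String) (out : Bool) : Prop := out = validRegex_alt regex
instance (regex : String) (out : Bool) : Decidable (Spec_validRegex regex out) := by unfold Spec_validRegex; infer_instance

-- ===== CLAIM (what is proved, stated in full; the proofs are below) =====
def Claim_equal_validRegex : Prop := ∀ (regex : String), Dom_validRegex regex → Spec_validRegex regex (validRegex regex)

-- ===== LEMMAS AND PROOFS =====

lemma suffix_cons2 (a b x y : Char) (rest : List Char) (h : rest ≠ []) :
    ([x,y] <:+ a::b::rest) ↔ ([x,y] <:+ b::rest) := by
  rw [List.suffix_cons_iff]
  simp only [or_iff_right_iff_imp]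
  intro he; exfalso; apply h
  rcases rest with _ | ⟨c, t⟩
  · rfl
  · simp [List.cons.injEq] at he

lemma infix_cons2 (a b x y : Char) (rest : List Char) :
    ([x,y] <:+: a::b::rest) ↔ ((x = a ∧ y = b) ∨ [x,y] <:+: b::rest) := by
  rw [List.infix_cons_iff]
  simp [List.cons_prefix_cons]

-- proof-side pair scan over the character list (the adjacent-pair checks of A's loop body from index ≥ 1 onwards)
def tailOK : List Char → Bool
  | [] => true
  | [_] => true
  | a :: b :: rest =>
      !(rest.isEmpty && a == '*' && (b == '+' || b == '*'))
      && !(a == '*' && b == '*')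
      && !(a == '+' && (b == '+' || b == '*'))
      && tailOK (b :: rest)

lemma tailOK_true_iff (cs : List Char) :
    tailOK cs = true ↔
      (¬(['*','*'] <:+: cs) ∧ ¬(['+','+'] <:+: cs) ∧ ¬(['+','*'] <:+: cs) ∧ ¬(['*','+'] <:+ cs)) := by
  induction cs using tailOK.induct with
  | case1 => simp [tailOK]
  | case2 a => simp [tailOK, List.infix_cons_iff, List.suffix_cons_iff]
  | case3 a b rest ih =>
    rcases rest with _ | ⟨c, t⟩
    · simp [tailOK, List.infix_cons_iff, List.suffix_cons_iff, List.cons_prefix_cons,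
        List.suffix_nil] at ih ⊢
      tauto
    · rw [tailOK]
      simp only [List.isEmpty_cons, Bool.false_and, Bool.not_false, Bool.true_and,
        Bool.and_eq_true, Bool.not_eq_true', Bool.and_eq_false_iff, Bool.or_eq_false_iff,
        beq_eq_false_iff_ne, ne_eq]
      rw [ih, infix_cons2 a b '*' '*' (c::t), infix_cons2 a b '+' '+' (c::t),
        infix_cons2 a b '+' '*' (c::t), suffix_cons2 a b '*' '+' (c::t) (by simp)]
      tauto

lemma go_eq_tailOK (cs : List Char) :
    ∀ n i, n = cs.length - i →
    (i = 0 → (cs.getD 0 ' ' == '*' || cs.getD 0 ' ' == '+') = false) →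
    validRegexGo cs cs.length i = tailOK (cs.drop i) := by
  intro n
  induction n with
  | zero =>
    intro i hn _
    rw [validRegexGo, dif_neg (by omega), List.drop_eq_nil_of_le (by omega)]
    rfl
  | succ n ih =>
    intro i hn h0
    have hi : i < cs.length := by omega
    have hgd : cs.getD i ' ' = cs[i] := List.getD_eq_getElem cs ' ' hi
    have hd : cs.drop i = cs[i] :: cs.drop (i+1) := List.drop_eq_getElem_cons hi
    have hce : (i == 0 && (cs.getD i ' ' == '*' || cs.getD i ' ' == '+')) = false := by
      rcases Nat.eq_zero_or_pos i with h | h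
      · subst h
        simp only [beq_self_eq_true, Bool.true_and]
        exact h0 rfl
      · simp [Nat.pos_iff_ne_zero.mp h]
    rw [validRegexGo, dif_pos hi]
    simp only [hce, Bool.false_eq_true, if_false]
    by_cases h2 : i < cs.length - 1
    · have hi1 : i + 1 < cs.length := by omega
      have hgd1 : cs.getD (i+1) ' ' = cs[i+1] := List.getD_eq_getElem cs ' ' hi1
      have hd1 : cs.drop (i+1) = cs[i+1] :: cs.drop (i+2) := List.drop_eq_getElem_cons hi1
      have hrec : validRegexGo cs cs.length (i+1) = tailOK (cs.drop (i+1)) :=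
        ih (i+1) (by omega) (by omega)
      have hend : (i == cs.length - 2) = (cs.drop (i+2)).isEmpty := by
        have hlen : ((cs.drop (i+2)).isEmpty = true) ↔ cs.length ≤ i + 2 := by
          rw [List.isEmpty_iff, List.drop_eq_nil_iff]
        rw [Bool.eq_iff_iff, hlen, beq_iff_eq]
        omega
      rw [if_pos h2, hd, hd1, tailOK, hgd, hgd1, hrec, hd1, hend]
      generalize tailOK (cs[i+1] :: cs.drop (i+2)) = T
      clear ih hrec hd hd1 hgd hgd1 hce h0 hn
      cases hE : (cs.drop (i+2)).isEmpty <;>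
        by_cases ha : cs[i] = '*' <;> by_cases hb : cs[i+1] = '*' <;>
        by_cases ha' : cs[i] = '+' <;> by_cases hb' : cs[i+1] = '+' <;>
        simp_all
    · have hrec : validRegexGo cs cs.length (i+1) = tailOK (cs.drop (i+1)) :=
        ih (i+1) (by omega) (by omega)
      rw [if_neg h2, hrec]
      have : i + 1 ≥ cs.length := by omega
      rw [List.drop_eq_nil_of_le this, hd, List.drop_eq_nil_of_le this]
      rfl

-- ===== VERDICT (by name: the statement is the Claim_ definition above) =====
theorem validRegex_spec : Claim_equal_validRegex := by
  intro regex _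
  unfold Spec_validRegex
  rcases h : regex.toList with _ | ⟨c, rest⟩
  · -- regex = ""
    have hne : regex = "" := String.toList_eq_nil_iff.mp h
    subst hne
    decide
  · -- regex nonempty
    have hne : regex ≠ "" := by
      intro he; subst he; simp at h
    have hget : PySem.Str.pyGet? regex 0 = some c := by
      simp [h, PySem.List.pyGet?, PySem.List.pyIdx?]
    have hlen : regex.toList.length ≠ 0 := by rw [h]; simp
    rw [validRegex]
    simp only [h] at hlen ⊢
    rw [if_neg (by simpa using hlen)]
    by_cases hc : c = '*' ∨ c = '+'
    · -- head is '*' or '+': both sides are false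
      have hgo : validRegexGo (c :: rest) (c :: rest).length 0 = false := by
        rw [validRegexGo, dif_pos (by simp)]
        have : ((0 : Nat) == 0 && ((c :: rest).getD 0 ' ' == '*' || (c :: rest).getD 0 ' ' == '+')) = true := by
          rcases hc with hc | hc <;> simp [hc]
        rw [if_pos this]
      rw [hgo, validRegex_alt, hget]
      rcases hc with hc | hc <;> simp [hc]
    · rw [not_or] at hc
      have h0 : ((c :: rest).getD 0 ' ' == '*' || (c :: rest).getD 0 ' ' == '+') = false := by
        simp [hc.1, hc.2]
      have := go_eq_tailOK (c :: rest) ((c :: rest).length - 0) 0 rfl (fun _ => h0)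
      rw [List.drop_zero] at this
      rw [this, validRegex_alt, hget]
      have hs1 : ("**" : String).toList = ['*','*'] := by decide
      have hs2 : ("++" : String).toList = ['+','+'] := by decide
      have hs3 : ("+*" : String).toList = ['+','*'] := by decide
      have hs4 : ("*+" : String).toList = ['*','+'] := by decide
      have hew : PySem.Chars.endswith (c :: rest) ['*','+'] = decide (['*','+'] <:+ (c :: rest)) := by
        rw [Bool.eq_iff_iff, PySem.Chars.endswith_iff, decide_eq_true_eq]
      have hc1 : ¬ c = '*' := hc.1
      have hc2 : ¬ c = '+' := hc.2
      rw [Bool.eq_iff_iff, tailOK_true_iff]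
      simp only [Bool.and_eq_true, Bool.not_eq_true', decide_eq_true_eq,
        PySem.Str.isIn_eq, PySem.Str.endswith_eq, hs1, hs2, hs3, hs4, h, hew,
        PySem.Chars.isIn_eq_false_iff, beq_eq_false_iff_ne, ne_eq, Option.some.injEq,
        decide_eq_false_iff_not]
      tauto
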